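-- pv_equiv track=rewrite | github.com/YallaPapi/coldemailAI | tests/security/security_test_utils.py | create_realistic_csv_with_injections
-- ===== SOURCE A (Python) =====
-- def create_realistic_csv_with_injections(num_rows: int = 1000) -> str:
--     """Create realistic CSV data with scattered injection attempts"""
--     headers = "First Name,Last Name,Company Name,Email,Job Title,Industry,City,State"
--     rows = [headers]
--
--     # Injection payloads to scatter throughout
--     injection_payloads = [
--         '=cmd|"/c calc"!A0',
--         '=HYPERLINK("http://evil.com")',
--         '@SUM(cmd|"/c dir"!A0)',
--         '=EXEC("malware.exe")',
--         '+cmd|"/c whoami"!A0'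
--     ]
--
--     industries = ['Technology', 'Healthcare', 'Finance', 'Manufacturing', 'Retail']
--     states = ['CA', 'NY', 'TX', 'FL', 'IL']
--
--     for i in range(num_rows):
--         # Insert injection payload every 200 rows
--         if i % 200 == 0 and i > 0:
--             payload_idx = (i // 200 - 1) % len(injection_payloads)
--             first_name = injection_payloads[payload_idx]
--         else:
--             first_name = f"User{i}"
--
--         row = f"{first_name},Lastname{i},Company{i},user{i}@company{i}.com,Title{i},{industries[i % len(industries)]},City{i},{states[i % len(states)]}"
--         rows.append(row)
--
--     return '\n'.join(rows)
-- ===== SOURCE B (Python) =====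
-- def create_realistic_csv_with_injections(num_rows: int = 1000) -> str:
--     """Create realistic CSV data with scattered injection attempts (build-then-patch)."""
--     headers = "First Name,Last Name,Company Name,Email,Job Title,Industry,City,State"
--     payloads = [
--         '=cmd|"/c calc"!A0',
--         '=HYPERLINK("http://evil.com")',
--         '@SUM(cmd|"/c dir"!A0)',
--         '=EXEC("malware.exe")',
--         '+cmd|"/c whoami"!A0',
--     ]
--     # industry/state kept as one cyclic table of pairs, indexed once per row
--     regions = [('Technology', 'CA'), ('Healthcare', 'NY'), ('Finance', 'TX'),
--                ('Manufacturing', 'FL'), ('Retail', 'IL')]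
--
--     def row(first, i):
--         industry, state = regions[i % 5]
--         s = str(i)
--         return ",".join([first, "Lastname" + s, "Company" + s,
--                          "user" + s + "@company" + s + ".com", "Title" + s,
--                          industry, "City" + s, state])
--
--     # uniform pass: every data row gets a plain User<i> first name
--     rows = [headers] + [row("User" + str(i), i) for i in range(num_rows)]
--     # sparse patch pass: overwrite only the injection positions (header offset +1)
--     for i in range(200, num_rows, 200):
--         rows[i + 1] = row(payloads[(i // 200 - 1) % 5], i)
--     return "\n".join(rows)
-- ===== Notes on version B (the rewrite author's own statement) =====
-- stated objective: alternative
-- what changed: A decides the injection branch inside its single row-building loop of comma-concatenated f-strings; B builds all rows uniformly in one comprehension (row = ','.join of a field list, industry/state taken from one cyclic table of pairs) and then does a second sparse pass over only the injection positions range(200, num_rows, 200), overwriting those rows in place.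
import Mathlib
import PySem

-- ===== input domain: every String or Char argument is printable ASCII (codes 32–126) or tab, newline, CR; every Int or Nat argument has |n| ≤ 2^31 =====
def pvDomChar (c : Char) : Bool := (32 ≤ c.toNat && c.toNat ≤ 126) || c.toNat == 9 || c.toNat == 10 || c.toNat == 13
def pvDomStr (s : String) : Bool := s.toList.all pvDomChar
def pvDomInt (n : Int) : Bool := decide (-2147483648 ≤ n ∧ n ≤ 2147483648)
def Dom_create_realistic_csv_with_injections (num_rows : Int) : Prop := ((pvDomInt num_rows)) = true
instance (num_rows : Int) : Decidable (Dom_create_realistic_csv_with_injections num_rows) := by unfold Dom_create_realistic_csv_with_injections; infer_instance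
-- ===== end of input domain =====

-- B replaces A's branch-in-loop by a build-then-patch decomposition (uniform rows built as
-- ','.join of field lists over one cyclic industry/state pair table, then a sparse overwrite
-- pass at the injection positions); objective: alternative.


-- ===== PORT A =====
def pvHeadersA : String := "First Name,Last Name,Company Name,Email,Job Title,Industry,City,State"
def pvPayloadsA : List String :=
  ["=cmd|\"/c calc\"!A0", "=HYPERLINK(\"http://evil.com\")", "@SUM(cmd|\"/c dir\"!A0)",
   "=EXEC(\"malware.exe\")", "+cmd|\"/c whoami\"!A0"]
def pvIndustriesA : List String := ["Technology", "Healthcare", "Finance", "Manufacturing", "Retail"]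
def pvStatesA : List String := ["CA", "NY", "TX", "FL", "IL"]

-- the f-string building one row; the pyGetD default is never used: 0 ≤ i % 5 < 5 = length
def pvRowA (first_name : String) (i : Int) : String :=
  first_name ++ "," ++ "Lastname" ++ PySem.Int.toStr i ++ ",Company" ++ PySem.Int.toStr i ++
  ",user" ++ PySem.Int.toStr i ++ "@company" ++ PySem.Int.toStr i ++ ".com,Title" ++ PySem.Int.toStr i ++
  "," ++ PySem.List.pyGetD pvIndustriesA (PySem.Int.mod i (PySem.List.len pvIndustriesA)) "" ++
  ",City" ++ PySem.Int.toStr i ++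
  "," ++ PySem.List.pyGetD pvStatesA (PySem.Int.mod i (PySem.List.len pvStatesA)) ""

def create_realistic_csv_with_injections (num_rows : Int) : String :=
  let rows : List String :=
    (PySem.List.pyRange 0 num_rows 1).foldl
      (fun rows i =>
        let first_name :=
          if PySem.Int.mod i 200 = 0 ∧ 0 < i then
            PySem.List.pyGetD pvPayloadsA
              (PySem.Int.mod (PySem.Int.floordiv i 200 - 1) (PySem.List.len pvPayloadsA)) ""
          else "User" ++ PySem.Int.toStr i
        rows ++ [pvRowA first_name i])
      [pvHeadersA]
  PySem.Str.join "\n" rows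

-- ===== PORT B =====
def pvHeadersB : String := "First Name,Last Name,Company Name,Email,Job Title,Industry,City,State"
def pvPayloadsB : List String :=
  ["=cmd|\"/c calc\"!A0", "=HYPERLINK(\"http://evil.com\")", "@SUM(cmd|\"/c dir\"!A0)",
   "=EXEC(\"malware.exe\")", "+cmd|\"/c whoami\"!A0"]
-- Source B's cyclic table of (industry, state) pairs
def pvRegionsB : List (String × String) :=
  [("Technology", "CA"), ("Healthcare", "NY"), ("Finance", "TX"),
   ("Manufacturing", "FL"), ("Retail", "IL")]

-- Source B's row(first, i): ','.join of the field list; the pyGetD default is never used (0 ≤ i % 5 < 5)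
def pvRowB (first : String) (i : Int) : String :=
  let p := PySem.List.pyGetD pvRegionsB (PySem.Int.mod i 5) ("", "")
  let s := PySem.Int.toStr i
  PySem.Str.join "," [first, "Lastname" ++ s, "Company" ++ s,
    "user" ++ s ++ "@company" ++ s ++ ".com", "Title" ++ s, p.1, "City" ++ s, p.2]

def create_realistic_csv_with_injections_alt (num_rows : Int) : String :=
  -- uniform pass
  let base : List String :=
    pvHeadersB :: (PySem.List.pyRange 0 num_rows 1).map
      (fun i => pvRowB ("User" ++ PySem.Int.toStr i) i)
  -- sparse patch pass; rows[i+1] is always in range (1 ≤ i+1 ≤ num_rows < len rows), so pySetD is exact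
  let rows : List String :=
    (PySem.List.pyRange 200 num_rows 200).foldl
      (fun rows i =>
        PySem.List.pySetD rows (i + 1)
          (pvRowB (PySem.List.pyGetD pvPayloadsB (PySem.Int.mod (PySem.Int.floordiv i 200 - 1) 5) "") i))
      base
  PySem.Str.join "\n" rows

-- ===== PRECONDITION & SPEC =====
def Spec_create_realistic_csv_with_injections (num_rows : Int) (out : String) : Prop := out = create_realistic_csv_with_injections_alt num_rows
instance (num_rows : Int) (out : String) : Decidable (Spec_create_realistic_csv_with_injections num_rows out) := by unfold Spec_create_realistic_csv_with_injections; infer_instance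

-- ===== CLAIM (what is proved, stated in full; the proofs are below) =====
def Claim_equal_create_realistic_csv_with_injections : Prop := ∀ (num_rows : Int), Dom_create_realistic_csv_with_injections num_rows → Spec_create_realistic_csv_with_injections num_rows (create_realistic_csv_with_injections num_rows)

-- ===== LEMMAS AND PROOFS =====

-- A's per-row function (branch included), used to characterise A's list of rows
def pvRowFnA (i : Int) : String :=
  pvRowA
    (if PySem.Int.mod i 200 = 0 ∧ 0 < i then
       PySem.List.pyGetD pvPayloadsA
         (PySem.Int.mod (PySem.Int.floordiv i 200 - 1) (PySem.List.len pvPayloadsA)) ""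
     else "User" ++ PySem.Int.toStr i) i

-- B's patch value at position i
def pvPatchB (i : Int) : String :=
  pvRowB (PySem.List.pyGetD pvPayloadsB (PySem.Int.mod (PySem.Int.floordiv i 200 - 1) 5) "") i

-- B's ','-joined field list is the same string as A's f-string row
lemma pvRowB_eq_rowA (first : String) (i : Int) : pvRowB first i = pvRowA first i := by
  have hm0 : 0 ≤ PySem.Int.mod i 5 := PySem.Int.mod_nonneg i (by norm_num)
  have hm5 : PySem.Int.mod i 5 < 5 := PySem.Int.mod_lt i (by norm_num)
  have hpair : (PySem.List.pyGetD pvRegionsB (PySem.Int.mod i 5) ("", "")).1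
        = PySem.List.pyGetD pvIndustriesA (PySem.Int.mod i (PySem.List.len pvIndustriesA)) ""
      ∧ (PySem.List.pyGetD pvRegionsB (PySem.Int.mod i 5) ("", "")).2
        = PySem.List.pyGetD pvStatesA (PySem.Int.mod i (PySem.List.len pvStatesA)) "" := by
    have h5 : PySem.Int.mod i 5 = 0 ∨ PySem.Int.mod i 5 = 1 ∨ PySem.Int.mod i 5 = 2 ∨
        PySem.Int.mod i 5 = 3 ∨ PySem.Int.mod i 5 = 4 := by omega
    have hlen : PySem.List.len pvIndustriesA = 5 := by decide
    have hlen' : PySem.List.len pvStatesA = 5 := by decide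
    rw [hlen, hlen']
    rcases h5 with h | h | h | h | h <;> rw [h] <;> exact ⟨by decide, by decide⟩
  apply String.toList_injective
  rw [pvRowA, show (",Company" : String) = "," ++ "Company" from rfl,
      show (",user" : String) = "," ++ "user" from rfl,
      show (".com,Title" : String) = ".com" ++ "," ++ "Title" from rfl,
      show (",City" : String) = "," ++ "City" from rfl, ← hpair.1, ← hpair.2]
  simp only [pvRowB, PySem.Str.toList_join, List.map_cons, List.map_nil,
    PySem.Chars.join_cons_cons, PySem.Chars.join_singleton, String.toList_append,
    List.append_assoc]

lemma pvFoldSetD_getElem? (l : List Int) (base : List String) (k : Nat)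
    (hl : ∀ i ∈ l, 0 ≤ i ∧ (i + 1).toNat < base.length) :
    (l.foldl (fun rows i => PySem.List.pySetD rows (i + 1) (pvPatchB i)) base)[k]?
      = if ((k : Int) - 1) ∈ l then some (pvPatchB ((k : Int) - 1)) else base[k]? := by
  induction l generalizing base with
  | nil => simp
  | cons a t ih =>
    have ha := hl a (by simp)
    rw [List.foldl_cons, ih _ (fun i hi => by
      have := hl i (List.mem_cons_of_mem _ hi)
      simpa [PySem.List.length_pySetD] using this)]
    have hset : PySem.List.pySetD base (a + 1) (pvPatchB a)
        = base.set (a + 1).toNat (pvPatchB a) :=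
      PySem.List.pySetD_of_nonneg _ _ (by omega)
    by_cases ht : ((k : Int) - 1) ∈ t
    · simp [ht]
    · by_cases hk : (k : Int) - 1 = a
      · have hidx : (a + 1).toNat = k := by omega
        have hklen : k < base.length := by omega
        simp [hk, hset, hidx, hklen]
      · have hidx : (a + 1).toNat ≠ k := by omega
        simp [ht, hk, hset, hidx]

theorem pvMain (num_rows : Int) :
    create_realistic_csv_with_injections num_rows
      = create_realistic_csv_with_injections_alt num_rows := by
  have hmem := fun x => PySem.List.mem_pyRange_iff_of_pos
    (a := 200) (b := num_rows) (s := 200) (by norm_num) x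
  have hbase_len : (pvHeadersB :: (PySem.List.pyRange 0 num_rows 1).map
      (fun i => pvRowB ("User" ++ PySem.Int.toStr i) i)).length
        = num_rows.toNat + 1 := by
    simp [PySem.List.length_pyRange_one]
  have hl : ∀ i ∈ PySem.List.pyRange 200 num_rows 200,
      0 ≤ i ∧ (i + 1).toNat < (pvHeadersB :: (PySem.List.pyRange 0 num_rows 1).map
        (fun i => pvRowB ("User" ++ PySem.Int.toStr i) i)).length := by
    intro i hi
    rw [hmem i] at hi
    exact ⟨by omega, by rw [hbase_len]; omega⟩
  have hlist : [pvHeadersA] ++ (PySem.List.pyRange 0 num_rows 1).map pvRowFnA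
      = (PySem.List.pyRange 200 num_rows 200).foldl
          (fun rows i => PySem.List.pySetD rows (i + 1) (pvPatchB i))
          (pvHeadersB :: (PySem.List.pyRange 0 num_rows 1).map
            (fun i => pvRowB ("User" ++ PySem.Int.toStr i) i)) := by
    apply List.ext_getElem?
    intro k
    rw [pvFoldSetD_getElem? _ _ _ hl]
    cases k with
    | zero =>
      have h0 : ¬ (((0 : Nat) : Int) - 1 ∈ PySem.List.pyRange 200 num_rows 200) := by
        rw [hmem]; omega
      rw [List.singleton_append, List.getElem?_cons_zero, List.getElem?_cons_zero, if_neg h0]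
      rfl
    | succ m =>
      have hsub : ((m + 1 : Nat) : Int) - 1 = (m : Int) := by push_cast; ring
      rw [hsub]
      by_cases hm : (m : Int) < num_rows
      · have hNat : num_rows = ((num_rows.toNat : Int)) := by omega
        have hmN : m < num_rows.toNat := by omega
        have e1 : ((PySem.List.pyRange 0 num_rows 1).map pvRowFnA)[m]?
            = some (pvRowFnA (m : Int)) := by
          rw [hNat]; exact PySem.List.getElem?_map_pyRange_zero _ _ _ hmN
        have e2 : ((PySem.List.pyRange 0 num_rows 1).map
            (fun i => pvRowB ("User" ++ PySem.Int.toStr i) i))[m]?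
            = some (pvRowB ("User" ++ PySem.Int.toStr (m : Int)) (m : Int)) := by
          rw [hNat]; exact PySem.List.getElem?_map_pyRange_zero _ _ _ hmN
        by_cases hin : (m : Int) ∈ PySem.List.pyRange 200 num_rows 200
        · rw [if_pos hin]
          rw [hmem] at hin
          have hcond : PySem.Int.mod (m : Int) 200 = 0 ∧ 0 < (m : Int) :=
            ⟨by rw [PySem.Int.mod_eq_zero_iff_dvd]; omega, by omega⟩
          rw [List.singleton_append, List.getElem?_cons_succ, e1]
          unfold pvRowFnA pvPatchB
          rw [if_pos hcond, pvRowB_eq_rowA]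
          norm_num [pvPayloadsA, pvPayloadsB, PySem.List.len_eq]
        · rw [if_neg hin]
          rw [hmem] at hin
          have hcond : ¬ (PySem.Int.mod (m : Int) 200 = 0 ∧ 0 < (m : Int)) := by
            rw [PySem.Int.mod_eq_zero_iff_dvd]
            rintro ⟨h1, h2⟩
            exact hin ⟨by omega, hm, by omega⟩
          rw [List.singleton_append, List.getElem?_cons_succ, e1,
              List.getElem?_cons_succ, e2]
          unfold pvRowFnA
          rw [if_neg hcond, pvRowB_eq_rowA]
      · have hnotin : ¬ ((m : Int) ∈ PySem.List.pyRange 200 num_rows 200) := by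
          rw [hmem]; omega
        rw [if_neg hnotin]
        rw [List.getElem?_eq_none, List.getElem?_eq_none]
        · rw [hbase_len]; omega
        · simp [PySem.List.length_pyRange_one]; omega
  unfold create_realistic_csv_with_injections create_realistic_csv_with_injections_alt
  simp only [PySem.List.foldl_append_singleton_eq_map]
  rw [show (fun i => pvRowA
      (if PySem.Int.mod i 200 = 0 ∧ 0 < i then
        PySem.List.pyGetD pvPayloadsA
          (PySem.Int.mod (PySem.Int.floordiv i 200 - 1) (PySem.List.len pvPayloadsA)) ""
      else "User" ++ PySem.Int.toStr i) i) = pvRowFnA from rfl]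
  rw [show (fun (rows : List String) (i : Int) =>
        PySem.List.pySetD rows (i + 1)
          (pvRowB (PySem.List.pyGetD pvPayloadsB (PySem.Int.mod (PySem.Int.floordiv i 200 - 1) 5) "") i))
      = (fun (rows : List String) (i : Int) => PySem.List.pySetD rows (i + 1) (pvPatchB i)) from rfl]
  rw [hlist]

-- ===== VERDICT (by name: the statement is the Claim_ definition above) =====
theorem create_realistic_csv_with_injections_spec : Claim_equal_create_realistic_csv_with_injections := by
  intro n _
  unfold Spec_create_realistic_csv_with_injections
  exact pvMain n
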